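-- pv_equiv track=rewrite | github.com/Jazbarrionuev0/UPC-Formartter | pages/String_Formatter.py | format_output_lines
-- ===== SOURCE A (Python) =====
-- def format_output_lines(formatted_list):
--     """Joins the list into lines of 10 items for readability."""
--     output_lines = []
--     for i in range(0, len(formatted_list), 10):
--         chunk = formatted_list[i:i+10]
--         line = ",".join(chunk)
--         if i + 10 < len(formatted_list):
--             line += ","
--         output_lines.append(line)
--     return "\n".join(output_lines)
-- ===== SOURCE B (Python) =====
-- def format_output_lines(formatted_list):
--     """Joins the list into lines of 10 items for readability (single flat pass)."""
--     parts = []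
--     n = len(formatted_list)
--     for idx, item in enumerate(formatted_list):
--         parts.append(item)
--         if idx + 1 < n:
--             parts.append(",\n" if (idx + 1) % 10 == 0 else ",")
--     return "".join(parts)
-- ===== Notes on version B (the rewrite author's own statement) =====
-- stated objective: simpler
-- what changed: Replaced A's chunking loop (slice 10-element chunks, join each with commas, append a trailing comma to non-final lines, join lines with newlines) by a single flat pass over enumerate(list) that appends each item and, when it is not the last, one separator token (",\n" after every 10th item, "," otherwise) to one token list joined once at the end.
import Mathlib
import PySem

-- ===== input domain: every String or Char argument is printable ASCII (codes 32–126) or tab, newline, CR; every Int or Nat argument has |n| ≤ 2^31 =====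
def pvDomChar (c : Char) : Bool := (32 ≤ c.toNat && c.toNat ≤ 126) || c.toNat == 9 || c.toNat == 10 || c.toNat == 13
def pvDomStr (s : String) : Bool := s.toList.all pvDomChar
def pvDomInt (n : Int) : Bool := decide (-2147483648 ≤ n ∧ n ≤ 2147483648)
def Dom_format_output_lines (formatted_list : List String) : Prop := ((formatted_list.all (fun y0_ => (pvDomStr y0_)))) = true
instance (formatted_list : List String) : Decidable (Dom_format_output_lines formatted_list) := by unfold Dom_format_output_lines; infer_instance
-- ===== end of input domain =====

-- B replaces A's chunk-slicing loop by a single flat pass appending each item and its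
-- following separator (",\n" after every 10th item) to one token list; objective: simpler.

-- ===== PORT A =====
def format_output_lines (formatted_list : List String) : String :=
  let output_lines : List String :=
    (PySem.List.pyRange 0 (formatted_list.length : Int) 10).foldl
      (fun output_lines i =>
        let chunk := PySem.List.slice formatted_list (some i) (some (i + 10))
        let line := PySem.Str.join "," chunk
        let line := if i + 10 < (formatted_list.length : Int) then line ++ "," else line
        output_lines ++ [line]) []
  PySem.Str.join "\n" output_lines

-- ===== PORT B =====
def format_output_lines_alt (formatted_list : List String) : String :=
  let n : Int := (formatted_list.length : Int)
  let parts : List String :=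
    (PySem.List.enumerate formatted_list 0).foldl
      (fun parts p =>
        let parts := parts ++ [p.2]
        if p.1 + 1 < n then
          parts ++ [if PySem.Int.mod (p.1 + 1) 10 == 0 then ",\n" else ","]
        else parts) []
  PySem.Str.join "" parts

-- ===== PRECONDITION & SPEC =====
def Spec_format_output_lines (formatted_list : List String) (out : String) : Prop := out = format_output_lines_alt formatted_list
instance (formatted_list : List String) (out : String) : Decidable (Spec_format_output_lines formatted_list out) := by unfold Spec_format_output_lines; infer_instance

-- ===== CLAIM (what is proved, stated in full; the proofs are below) =====
def Claim_equal_format_output_lines : Prop := ∀ (formatted_list : List String), Dom_format_output_lines formatted_list → Spec_format_output_lines formatted_list (format_output_lines formatted_list)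

-- ===== LEMMAS AND PROOFS =====

-- reference shape of the output, recursing by chunks of 10
def chunkRef (xs : List String) : List Char :=
  if xs.length ≤ 10 then PySem.Chars.join [','] (xs.map String.toList)
  else
    PySem.Chars.join [','] ((xs.take 10).map String.toList) ++ [',', '\n'] ++
      chunkRef (xs.drop 10)
termination_by xs.length
decreasing_by simp; omega

-- token generator of B's loop (n = total length)
def gB (n : Int) (p : Int × String) : List String :=
  [p.2] ++ (if p.1 + 1 < n then [if PySem.Int.mod (p.1 + 1) 10 == 0 then ",\n" else ","] else [])

-- the line built by A's loop body at offset i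
def lineA (xs : List String) (i : Int) : String :=
  let chunk := PySem.List.slice xs (some i) (some (i + 10))
  let line := PySem.Str.join "," chunk
  if i + 10 < (xs.length : Int) then line ++ "," else line

theorem foldl_append_singleton {α β : Type} (g : α → β) (l : List α) (acc : List β) :
    l.foldl (fun a x => a ++ [g x]) acc = acc ++ l.map g := by
  induction l generalizing acc with
  | nil => simp
  | cons x xs ih => simp [ih]

theorem join_nil_flatten (as : List (List Char)) :
    PySem.Chars.join [] as = as.flatten := by
  induction as with
  | nil => simp [PySem.Chars.join, List.intercalate]
  | cons a as ih =>
      cases as with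
      | nil => simp [PySem.Chars.join_singleton]
      | cons b r =>
          rw [PySem.Chars.join_cons_cons]
          simp [ih]

theorem join_nil_append (as bs : List (List Char)) :
    PySem.Chars.join [] (as ++ bs) = PySem.Chars.join [] as ++ PySem.Chars.join [] bs := by
  simp [join_nil_flatten]

theorem join_cons_of_ne_nil (sep p : List Char) (rest : List (List Char)) (h : rest ≠ []) :
    PySem.Chars.join sep (p :: rest) = p ++ sep ++ PySem.Chars.join sep rest := by
  cases rest with
  | nil => exact absurd rfl h
  | cons q r => exact PySem.Chars.join_cons_cons sep p q r

-- B's loop body is an append of gB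
theorem B_loop_eq (l : List (Int × String)) (n : Int) (acc : List String) :
    l.foldl
      (fun parts p =>
        let parts := parts ++ [p.2]
        if p.1 + 1 < n then
          parts ++ [if PySem.Int.mod (p.1 + 1) 10 == 0 then ",\n" else ","]
        else parts) acc = acc ++ l.flatMap (gB n) := by
  induction l generalizing acc with
  | nil => simp
  | cons p l ih =>
      rw [List.foldl_cons, ih]
      simp only [gB, List.flatMap_cons]
      split <;> simp

theorem pvCommaToList : ("," : String).toList = [','] := rfl

theorem pvCommaNlToList : (",\n" : String).toList = [',', '\n'] := rfl

theorem mod_ten_shift (a : Int) : PySem.Int.mod (a + 10) 10 = PySem.Int.mod a 10 := by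
  simp [PySem.Int.mod]

theorem mod_ten_small (a : Int) (h1 : 1 ≤ a) (h2 : a < 10) :
    (PySem.Int.mod a 10 == 0) = false := by
  have he : PySem.Int.mod a 10 = a % 10 := by
    simp [PySem.Int.mod, Int.fmod_eq_emod]
  simp only [he, beq_eq_false_iff_ne, ne_eq]
  omega

-- shifting the start of B's enumeration by 10 = lowering the bound by 10
theorem gB_shift (xs : List String) (s n : Int) :
    (PySem.List.enumerate xs (s + 10)).flatMap (gB n)
      = (PySem.List.enumerate xs s).flatMap (gB (n - 10)) := by
  induction xs generalizing s with
  | nil => simp [PySem.List.enumerate_nil]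
  | cons x xs ih =>
      rw [PySem.List.enumerate_cons, PySem.List.enumerate_cons]
      simp only [List.flatMap_cons]
      have h1 : s + 10 + 1 = (s + 1) + 10 := by ring
      rw [h1, ih]
      congr 1
      simp only [gB]
      rw [h1, mod_ten_shift]
      have h2 : s + 1 + 10 < n ↔ s + 1 < n - 10 := by omega
      simp [h2]

-- a short final chunk (indices s.. with s + len = n ≤ 10, 0 ≤ s) joins with plain commas
theorem gB_short (xs : List String) (s n : Int) (h0 : 0 ≤ s)
    (hlen : s + xs.length = n) (hn : n ≤ 10) :
    PySem.Chars.join [] (((PySem.List.enumerate xs s).flatMap (gB n)).map String.toList)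
      = PySem.Chars.join [','] (xs.map String.toList) := by
  induction xs generalizing s with
  | nil => simp [PySem.List.enumerate_nil, PySem.Chars.join_nil]
  | cons x xs ih =>
      rw [PySem.List.enumerate_cons]
      simp only [List.flatMap_cons]
      cases xs with
      | nil =>
          have hc : ¬ (s + 1 < n) := by simp at hlen; omega
          simp [gB, hc, PySem.Chars.join_singleton]
      | cons y r =>
          have hl : s + 1 + ((y :: r).length : Int) = n := by
            simp only [List.length_cons] at hlen ⊢; push_cast at hlen ⊢; omega
          have hpos : (0:Int) < ((y :: r).length : Int) := by exact_mod_cast Nat.succ_pos r.length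
          have hc : s + 1 < n := by omega
          have hm : (PySem.Int.mod (s + 1) 10 == 0) = false := by
            apply mod_ten_small <;> omega
          simp only [gB, hc, if_true, hm, Bool.false_eq_true, if_neg, not_false_iff]
          have ihr := ih (s + 1) (by omega) hl
          rw [join_nil_flatten] at ihr ⊢
          conv_rhs => rw [List.map_cons, List.map_cons, PySem.Chars.join_cons_cons,
            ← List.map_cons]
          rw [← ihr]
          simp [pvCommaToList]

-- a full chunk (s + len = 10 < n, chunk nonempty) joins with commas and ends ",\n"
theorem gB_full (xs : List String) (s n : Int) (h0 : 0 ≤ s) (hne : xs ≠ [])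
    (hlen : s + xs.length = 10) (hn : 10 < n) :
    PySem.Chars.join [] (((PySem.List.enumerate xs s).flatMap (gB n)).map String.toList)
      = PySem.Chars.join [','] (xs.map String.toList) ++ [',', '\n'] := by
  induction xs generalizing s with
  | nil => exact absurd rfl hne
  | cons x xs ih =>
      rw [PySem.List.enumerate_cons]
      simp only [List.flatMap_cons]
      cases xs with
      | nil =>
          have hs : s = 9 := by simp at hlen; omega
          subst hs
          simp [gB, hn, PySem.Chars.join_singleton, join_nil_flatten,
            pvCommaNlToList, PySem.Int.mod]
      | cons y r =>
          have hl : s + 1 + ((y :: r).length : Int) = 10 := by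
            simp only [List.length_cons] at hlen ⊢; push_cast at hlen ⊢; omega
          have hpos : (0:Int) < ((y :: r).length : Int) := by exact_mod_cast Nat.succ_pos r.length
          have hc : s + 1 < n := by omega
          have hm : (PySem.Int.mod (s + 1) 10 == 0) = false := by
            apply mod_ten_small <;> omega
          simp only [gB, hc, if_true, hm, Bool.false_eq_true, if_neg, not_false_iff]
          have ihr := ih (s + 1) (by omega) (List.cons_ne_nil y r) hl
          rw [join_nil_flatten] at ihr ⊢
          conv_rhs => rw [List.map_cons, List.map_cons, PySem.Chars.join_cons_cons,
            ← List.map_cons]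
          rw [List.append_assoc, List.append_assoc, ← ihr]
          simp [pvCommaToList]

-- B's port as a char-level value
theorem B_toList (xs : List String) :
    (format_output_lines_alt xs).toList
      = PySem.Chars.join []
          (((PySem.List.enumerate xs 0).flatMap (gB (xs.length : Int))).map String.toList) := by
  simp only [format_output_lines_alt]
  rw [B_loop_eq]
  simp only [List.nil_append, PySem.Str.toList_join]
  rfl

theorem B_eq_chunkRef : ∀ (N : Nat) (xs : List String), xs.length ≤ N →
    (format_output_lines_alt xs).toList = chunkRef xs := by
  intro N
  induction N using Nat.strong_induction_on with
  | _ N ih =>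
      intro xs hN
      rw [B_toList]
      by_cases h : xs.length ≤ 10
      · rw [chunkRef, if_pos h]
        exact gB_short xs 0 _ le_rfl (by simp) (by exact_mod_cast h)
      · have h' : 10 < xs.length := by omega
        have hsplit : xs = xs.take 10 ++ xs.drop 10 := (List.take_append_drop 10 xs).symm
        have hlen10 : (xs.take 10).length = 10 := by simp; omega
        conv_lhs => rw [hsplit]
        rw [PySem.List.enumerate_append, List.flatMap_append, List.map_append, join_nil_append]
        rw [gB_full (xs.take 10) 0 _ le_rfl (by intro hx; rw [hx] at hlen10; simp at hlen10)
            (by rw [hlen10]; norm_num) (by rw [← hsplit]; exact_mod_cast h')]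
        rw [← hsplit]
        have hc10 : ((xs.take 10).length : Int) = 10 := by rw [hlen10]; norm_num
        rw [hc10, gB_shift]
        have hdl : ((xs.drop 10).length : Int) = (xs.length : Int) - 10 := by
          simp; omega
        rw [← hdl, ← B_toList]
        rw [ih (N - 1) (by omega) (xs.drop 10) (by simp; omega)]
        have hrx : chunkRef xs
            = PySem.Chars.join [','] ((xs.take 10).map String.toList) ++ [',', '\n'] ++
              chunkRef (xs.drop 10) := by
          rw [chunkRef, if_neg (by omega : ¬ xs.length ≤ 10)]
        rw [hrx]

-- A's loop as a map of lineA over the chunk offsets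
theorem A_toList (xs : List String) :
    (format_output_lines xs).toList
      = PySem.Chars.join ['\n']
          (((PySem.List.pyRange 0 (xs.length : Int) 10).map (lineA xs)).map String.toList) := by
  simp only [format_output_lines]
  rw [show (fun (output_lines : List String) (i : Int) =>
        let chunk := PySem.List.slice xs (some i) (some (i + 10))
        let line := PySem.Str.join "," chunk
        let line := if i + 10 < (xs.length : Int) then line ++ "," else line
        output_lines ++ [line]) = (fun a i => a ++ [lineA xs i]) from rfl]
  rw [foldl_append_singleton]
  simp only [List.nil_append, PySem.Str.toList_join]
  rfl

theorem pyRange_ten (n : Int) :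
    PySem.List.pyRange 0 n 10
      = (List.range (if 0 < n then ((n + 9) / 10).toNat else 0)).map
          (fun (k : Nat) => (10 : Int) * (k : Int)) := by
  rw [PySem.List.pyRange_of_pos 0 n (by norm_num)]
  simp only [zero_add, show n - 0 + 10 - 1 = n + 9 from by ring]

theorem slice_chunk (xs : List String) (j : Nat) :
    PySem.List.slice xs (some ((j : Int))) (some ((j : Int) + 10))
      = (xs.drop j).take 10 := by
  have := PySem.List.slice_natCast_add xs j 10
  simpa using this

theorem slice_head (xs : List String) :
    PySem.List.slice xs (some (0 : Int)) (some ((0 : Int) + 10)) = xs.take 10 := by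
  have := slice_chunk xs 0
  simpa using this

theorem lineA_shift (xs : List String) (h : 10 < xs.length) (k : Nat) :
    lineA xs (10 * ((k : Int) + 1)) = lineA (xs.drop 10) (10 * (k : Int)) := by
  simp only [lineA]
  have e1 : (10 : Int) * ((k : Int) + 1) = ((10 * k + 10 : Nat) : Int) := by push_cast; ring
  have e2 : (10 : Int) * (k : Int) = ((10 * k : Nat) : Int) := by push_cast; ring
  rw [e1, e2, slice_chunk, slice_chunk]
  have e3 : (xs.drop (10 * k + 10)) = ((xs.drop 10).drop (10 * k)) := by
    rw [List.drop_drop]; ring_nf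
  have e4 : ((xs.drop 10).length : Int) = (xs.length : Int) - 10 := by simp; omega
  rw [e3, e4]
  have e5 : (((10 * k + 10 : Nat) : Int) + 10 < (xs.length : Int))
      ↔ (((10 * k : Nat) : Int) + 10 < (xs.length : Int) - 10) := by push_cast; omega
  simp only [e5]

theorem A_toList' (xs : List String) :
    (format_output_lines xs).toList
      = PySem.Chars.join ['\n']
          ((List.range (if (0 : Int) < (xs.length : Int)
              then (((xs.length : Int) + 9) / 10).toNat else 0)).map
            (fun (k : Nat) => (lineA xs ((10 : Int) * (k : Int))).toList)) := by
  rw [A_toList, pyRange_ten, List.map_map, List.map_map]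
  rfl

theorem A_eq_chunkRef : ∀ (N : Nat) (xs : List String), xs.length ≤ N →
    (format_output_lines xs).toList = chunkRef xs := by
  intro N
  induction N using Nat.strong_induction_on with
  | _ N ih =>
      intro xs hN
      rw [A_toList']
      rcases Nat.eq_zero_or_pos xs.length with hz | hpos
      · have hxs : xs = [] := List.length_eq_zero_iff.mp hz
        subst hxs
        simp [chunkRef, PySem.Chars.join_nil]
      · have hp : (0 : Int) < (xs.length : Int) := by exact_mod_cast hpos
        by_cases h : xs.length ≤ 10
        · have hm : (((xs.length : Int) + 9) / 10).toNat = 1 := by omega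
          rw [if_pos hp, hm, List.range_one, List.map_cons, List.map_nil,
            PySem.Chars.join_singleton]
          simp only [lineA, Nat.cast_zero, mul_zero]
          rw [slice_head, List.take_of_length_le h,
            if_neg (by omega : ¬ ((0 : Int) + 10 < (xs.length : Int)))]
          rw [PySem.Str.toList_join, chunkRef, if_pos h, pvCommaToList]
        · have h' : 10 < xs.length := by omega
          have hm : (((xs.length : Int) + 9) / 10).toNat
              = ((((xs.length : Int) - 10) + 9) / 10).toNat + 1 := by omega
          rw [if_pos hp, hm, List.range_succ_eq_map, List.map_cons, List.map_map]
          have hcong : (List.range ((((xs.length : Int) - 10) + 9) / 10).toNat).map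
                ((fun (k : Nat) => (lineA xs ((10 : Int) * (k : Int))).toList) ∘ Nat.succ)
              = (List.range ((((xs.length : Int) - 10) + 9) / 10).toNat).map
                (fun (k : Nat) => (lineA (xs.drop 10) ((10 : Int) * (k : Int))).toList) := by
            apply List.map_congr_left
            intro k _
            simp only [Function.comp_apply]
            rw [show ((Nat.succ k : Nat) : Int) = (k : Int) + 1 from by push_cast; ring,
              lineA_shift xs h' k]
          rw [hcong]
          have hne2 : (List.range ((((xs.length : Int) - 10) + 9) / 10).toNat).map
                (fun (k : Nat) => (lineA (xs.drop 10) ((10 : Int) * (k : Int))).toList) ≠ [] := by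
            simp only [ne_eq, List.map_eq_nil_iff, List.range_eq_nil]
            omega
          rw [show ((10 : Int) * ((0 : Nat) : Int)) = (0 : Int) from by norm_num]
          rw [join_cons_of_ne_nil _ _ _ hne2]
          have hhead : lineA xs 0 = PySem.Str.join "," (xs.take 10) ++ "," := by
            simp only [lineA]
            rw [show (some (0 : Int)) = (some ((0 : Nat) : Int)) from by norm_num] at *
            rw [show ((0 : Int) + 10) = (((0 : Nat) : Int) + 10) from by norm_num] at *
            rw [slice_chunk, List.drop_zero, if_pos (by omega : ((0 : Nat) : Int) + 10 < (xs.length : Int))]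
          rw [hhead]
          have hdl : ((xs.drop 10).length : Int) = (xs.length : Int) - 10 := by
            simp; omega
          have htl : (List.range ((((xs.length : Int) - 10) + 9) / 10).toNat).map
                (fun (k : Nat) => (lineA (xs.drop 10) ((10 : Int) * (k : Int))).toList)
              = (List.range (if (0 : Int) < ((xs.drop 10).length : Int)
                  then ((((xs.drop 10).length : Int) + 9) / 10).toNat else 0)).map
                (fun (k : Nat) => (lineA (xs.drop 10) ((10 : Int) * (k : Int))).toList) := by
            rw [hdl, if_pos (by omega : (0 : Int) < (xs.length : Int) - 10)]
          rw [htl, ← A_toList']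
          rw [ih (N - 1) (by omega) (xs.drop 10) (by simp; omega)]
          have hrx : chunkRef xs
              = PySem.Chars.join [','] ((xs.take 10).map String.toList) ++ [',', '\n'] ++
                chunkRef (xs.drop 10) := by
            rw [chunkRef, if_neg (by omega : ¬ xs.length ≤ 10)]
          rw [hrx, String.toList_append, PySem.Str.toList_join, pvCommaToList]
          simp [List.append_assoc]

-- ===== VERDICT (by name: the statement is the Claim_ definition above) =====
theorem format_output_lines_spec : Claim_equal_format_output_lines := by
  intro xs _
  unfold Spec_format_output_lines
  apply String.toList_inj.mp
  rw [A_eq_chunkRef xs.length xs le_rfl, B_eq_chunkRef xs.length xs le_rfl]
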